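-- pv_equiv track=rewrite | github.com/butterygg/metric-report | 2025-10-fomc/2025-10-30T00-28-02-sonnet-4.5/binance_twap/main.py | check_contiguity
-- ===== SOURCE A (Python) =====
-- from typing import Any
--
-- INTERVAL_MS = 60000
--
-- def check_contiguity(
--     klines: list[dict[str, Any]],
--     start_ms: int,
-- ) -> tuple[bool, list[int]]:
--     """
--     Check if klines are contiguous starting from start_ms.
--
--     Args:
--         klines: List of kline dictionaries
--         start_ms: Expected start time
--
--     Returns:
--         Tuple of (is_contiguous, list_of_missing_open_times)
--     """
--     if not klines:
--         return True, []
--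
--     expected_times = {start_ms + i * INTERVAL_MS for i in range(len(klines))}
--     actual_times = {k["openTime"] for k in klines}
--     missing = sorted(expected_times - actual_times)
--
--     # Also check ordering
--     for i, k in enumerate(klines):
--         expected = start_ms + i * INTERVAL_MS
--         if k["openTime"] != expected:
--             return False, missing
--
--     return len(missing) == 0, missing
-- ===== SOURCE B (Python) =====
-- INTERVAL_MS = 60000
--
-- def check_contiguity(klines, start_ms):
--     n = len(klines)
--     # sort actual open times once, then merge against the ascending expected
--     # sequence with a single advancing pointer (no hash sets, no set difference)
--     times = sorted(k["openTime"] for k in klines)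
--     missing = []
--     j = 0
--     for i in range(n):
--         t = start_ms + i * INTERVAL_MS
--         while j < n and times[j] < t:
--             j += 1
--         if j == n or times[j] != t:
--             missing.append(t)
--     ordered = all(k["openTime"] == start_ms + i * INTERVAL_MS
--                   for i, k in enumerate(klines))
--     return ordered and not missing, missing
-- ===== Notes on version B (the rewrite author's own statement) =====
-- stated objective: alternative
-- what changed: B sorts the actual openTime values once and computes the missing list by a two-pointer merge of that sorted list against the ascending expected sequence (no hash sets, no set difference, no final sort), and computes the ordering flag with all() instead of an early-return loop.
import Mathlib
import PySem

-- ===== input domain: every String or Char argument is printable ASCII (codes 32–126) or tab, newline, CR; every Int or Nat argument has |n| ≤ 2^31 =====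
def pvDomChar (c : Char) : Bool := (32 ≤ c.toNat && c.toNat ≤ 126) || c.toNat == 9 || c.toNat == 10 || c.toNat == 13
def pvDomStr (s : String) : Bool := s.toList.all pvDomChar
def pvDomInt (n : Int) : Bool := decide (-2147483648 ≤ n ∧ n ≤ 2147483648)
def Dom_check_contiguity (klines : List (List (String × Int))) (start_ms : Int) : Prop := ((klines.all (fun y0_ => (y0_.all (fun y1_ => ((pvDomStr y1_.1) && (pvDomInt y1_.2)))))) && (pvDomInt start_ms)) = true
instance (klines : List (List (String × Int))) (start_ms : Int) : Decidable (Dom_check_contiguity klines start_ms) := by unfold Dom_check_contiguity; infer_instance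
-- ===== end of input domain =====

-- B sorts the actual openTime values once and merges them against the ascending expected
-- sequence with one advancing pointer (no hash sets, no set difference, no final sort);
-- the ordering flag is computed with all() instead of an early-return loop.

-- ===== PORT A =====
-- the ordering for-loop of A, with its early return
def chkLoopA (missing : List Int) (start_ms : Int) : List (Int × List (String × Int)) → Bool × List Int
  | [] => (decide (missing.length = 0), missing)
  | (i, k) :: rest =>
    if PySem.Dict.getD (PySem.Dict.ofList k) "openTime" 0 ≠ start_ms + i * 60000 then (false, missing)
    else chkLoopA missing start_ms rest

def check_contiguity (klines : List (List (String × Int))) (start_ms : Int) : Bool × List Int :=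
  if klines.isEmpty then (true, [])
  else
    let expected_times : PySem.Set Int :=
      PySem.Set.ofList ((PySem.List.pyRange 0 klines.length 1).map (fun i => start_ms + i * 60000))
    let actual_times : PySem.Set Int :=
      PySem.Set.ofList (klines.map (fun k => PySem.Dict.getD (PySem.Dict.ofList k) "openTime" 0))
    let missing := PySem.List.sorted (PySem.Set.diff expected_times actual_times) (fun x => x) false
    chkLoopA missing start_ms (PySem.List.enumerate klines 0)

-- ===== PORT B =====
-- B's merge loop: the pointer j is represented by the remaining suffix of the sorted
-- `times` list; `dropWhile (· < t)` is the `while j < n and times[j] < t: j += 1` advance.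
def mergeMissing : List Int → List Int → List Int
  | [], _ => []
  | t :: es, times =>
    let rest := times.dropWhile (fun u => decide (u < t))
    if rest.head? = some t then mergeMissing es rest
    else t :: mergeMissing es rest

def check_contiguity_alt (klines : List (List (String × Int))) (start_ms : Int) : Bool × List Int :=
  let times := PySem.List.sorted
      (klines.map (fun k => PySem.Dict.getD (PySem.Dict.ofList k) "openTime" 0)) (fun x => x) false
  let expected := (PySem.List.pyRange 0 klines.length 1).map (fun i => start_ms + i * 60000)
  let missing := mergeMissing expected times
  let ordered := (PySem.List.enumerate klines 0).all
      (fun p => PySem.Dict.getD (PySem.Dict.ofList p.2) "openTime" 0 == start_ms + p.1 * 60000)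
  (ordered && missing.isEmpty, missing)

-- ===== PRECONDITION & SPEC =====
-- Pre_ excludes klines containing a dict without the key "openTime", on which Python A (and B) raise KeyError.
def Pre_check_contiguity (klines : List (List (String × Int))) (start_ms : Int) : Prop :=
  klines.all (fun k => PySem.Dict.contains (PySem.Dict.ofList k) "openTime") = true
instance (klines : List (List (String × Int))) (start_ms : Int) : Decidable (Pre_check_contiguity klines start_ms) := by unfold Pre_check_contiguity; infer_instance

def pvWitness_check_contiguity : (List (List (String × Int))) × Int :=
  ([[("openTime", 60000)], [("openTime", 120000)]], 0)

def Spec_check_contiguity (klines : List (List (String × Int))) (start_ms : Int) (out : Bool × List Int) : Prop := out = check_contiguity_alt klines start_ms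
instance (klines : List (List (String × Int))) (start_ms : Int) (out : Bool × List Int) : Decidable (Spec_check_contiguity klines start_ms out) := by unfold Spec_check_contiguity; infer_instance

-- ===== CLAIM =====
def Claim_equal_check_contiguity : Prop := ∀ (klines : List (List (String × Int))) (start_ms : Int), Dom_check_contiguity klines start_ms → Pre_check_contiguity klines start_ms → Spec_check_contiguity klines start_ms (check_contiguity klines start_ms)

-- ===== LEMMAS AND PROOFS =====

-- A's early-return ordering loop equals the all()-based formulation B uses
theorem chkLoopA_eq_all (missing : List Int) (s : Int) (l : List (Int × List (String × Int))) :
    chkLoopA missing s l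
      = (l.all (fun p => PySem.Dict.getD (PySem.Dict.ofList p.2) "openTime" 0 == s + p.1 * 60000)
           && missing.isEmpty, missing) := by
  induction l with
  | nil => simp [chkLoopA]; cases missing <;> simp
  | cons p rest ih =>
    obtain ⟨i, k⟩ := p
    simp only [chkLoopA, List.all_cons]
    split_ifs with h
    · simp [h]
    · simp only [ne_eq, not_not] at h
      simp [h, ih]

theorem expected_pairwise (n : Nat) (s : Int) :
    (((PySem.List.pyRange 0 n 1).map (fun i => s + i * 60000)).Pairwise (· < ·)) := by
  refine List.Pairwise.map _ ?_ (PySem.List.pairwise_lt_pyRange_one 0 n)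
  intro a b hab
  have h60 : (0 : Int) < 60000 := by norm_num
  have : a * 60000 < b * 60000 := mul_lt_mul_of_pos_right hab h60
  omega

-- A's sorted set-difference equals an ascending filter of the expected sequence
theorem missingA_eq (n : Nat) (s : Int) (actual : PySem.Set Int) :
    PySem.List.sorted
      (PySem.Set.diff
        (PySem.Set.ofList ((PySem.List.pyRange 0 n 1).map (fun i => s + i * 60000)))
        actual)
      (fun x => x) false
    = ((PySem.List.pyRange 0 n 1).map (fun i => s + i * 60000)).filter
        (fun t => !(PySem.Set.contains actual t)) := by
  have hpw := expected_pairwise n s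
  have hnd : (((PySem.List.pyRange 0 n 1).map (fun i => s + i * 60000))).Nodup :=
    hpw.imp (fun h => ne_of_lt h)
  rw [PySem.Set.ofList_eq_self_of_nodup _ hnd]
  have hdiff : PySem.Set.diff ((PySem.List.pyRange 0 n 1).map (fun i => s + i * 60000)) actual
      = ((PySem.List.pyRange 0 n 1).map (fun i => s + i * 60000)).filter
          (fun t => !(PySem.Set.contains actual t)) := by
    simp [PySem.Set.diff, PySem.Set.contains]
  rw [hdiff]
  exact PySem.List.sorted_eq_of_perm_of_pairwise_lt _ _ _ (List.Perm.refl _) (hpw.filter _)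

-- the merge over a sorted list computes exactly the not-a-member filter
theorem mergeMissing_eq_filter (expected : List Int) :
    ∀ (times : List Int), times.Pairwise (· ≤ ·) → expected.Pairwise (· < ·) →
    mergeMissing expected times = expected.filter (fun t => !(times.contains t)) := by
  induction expected with
  | nil => intro times _ _; simp [mergeMissing]
  | cons t es ih =>
    intro times hts hpw
    have hpe : es.Pairwise (· < ·) := hpw.of_cons
    have htlt : ∀ x ∈ es, t < x := fun x hx => List.rel_of_pairwise_cons hpw hx
    set rest := times.dropWhile (fun u => decide (u < t)) with hrest
    have hrest_sub : rest.Sublist times := List.dropWhile_sublist _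
    have hrest_sorted : rest.Pairwise (· ≤ ·) := hts.sublist hrest_sub
    -- dropped elements are all < t
    have hdrop : ∀ x ∈ times.takeWhile (fun u => decide (u < t)), x < t := by
      intro x hx
      have := List.mem_takeWhile_imp hx
      simpa using this
    have hsplit : times = times.takeWhile (fun u => decide (u < t)) ++ rest :=
      (List.takeWhile_append_dropWhile).symm
    -- membership of t in times ↔ head of rest is t
    have hmem : (rest.head? = some t) ↔ t ∈ times := by
      constructor
      · intro h
        have : t ∈ rest := by
          cases hr : rest with
          | nil => simp [hr] at h
          | cons u l => simp [hr] at h; simp [hr, h]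
        exact hrest_sub.mem this
      · intro h
        rw [hsplit] at h
        rcases List.mem_append.mp h with h1 | h2
        · exact absurd (hdrop t h1) (lt_irrefl t)
        · cases hr : rest with
          | nil => simp [hr] at h2
          | cons u l =>
            have hhead : ¬ (decide (u < t) = true) := by
              have := List.head?_dropWhile_not (fun u => decide (u < t)) times
              rw [← hrest, hr] at this; simpa using this
            have hut : t ≤ u := by simpa using hhead
            rw [hr] at h2
            rcases List.mem_cons.mp h2 with h3 | h4
            · simp [hr, h3]
            · have : u ≤ t := by
                have := hrest_sorted
                rw [hr] at this
                exact List.rel_of_pairwise_cons this h4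
              have : u = t := le_antisymm this hut
              simp [hr, this]
    -- later expected values have the same membership in times and in rest
    have hsame : ∀ x ∈ es, times.contains x = rest.contains x := by
      intro x hx
      have htx : t < x := htlt x hx
      simp only [List.contains_eq_mem, eq_iff_iff, decide_eq_decide]
      constructor
      · intro h
        rw [hsplit] at h
        rcases List.mem_append.mp h with h1 | h2
        · exact absurd (lt_trans (hdrop x h1) htx) (lt_irrefl x)
        · exact h2
      · exact fun h => hrest_sub.mem h
    simp only [mergeMissing, ← hrest]
    have hfil : es.filter (fun x => !(times.contains x)) = es.filter (fun x => !(rest.contains x)) :=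
      List.filter_congr (fun x hx => by rw [hsame x hx])
    by_cases h : rest.head? = some t
    · have htmem : t ∈ times := hmem.mp h
      rw [if_pos h, ih rest hrest_sorted hpe, ← hfil]
      simp [List.filter_cons, htmem]
    · have htmem : t ∉ times := fun hc => h (hmem.mpr hc)
      rw [if_neg h, ih rest hrest_sorted hpe, ← hfil]
      simp [List.filter_cons, htmem]

-- ===== VERDICT =====
theorem check_contiguity_spec : Claim_equal_check_contiguity := by
  intro klines start_ms _ _
  unfold Spec_check_contiguity check_contiguity check_contiguity_alt
  set raw := klines.map (fun k => PySem.Dict.getD (PySem.Dict.ofList k) "openTime" 0) with hraw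
  set times := PySem.List.sorted raw (fun x => x) false with htimes
  have hsorted : times.Pairwise (· ≤ ·) := by
    simpa using PySem.List.sorted_pairwise raw (fun x => x)
  have hmergeB :
      mergeMissing ((PySem.List.pyRange 0 klines.length 1).map (fun i => start_ms + i * 60000)) times
      = ((PySem.List.pyRange 0 klines.length 1).map (fun i => start_ms + i * 60000)).filter
          (fun t => !(PySem.Set.contains (PySem.Set.ofList raw) t)) := by
    rw [mergeMissing_eq_filter _ times hsorted (expected_pairwise klines.length start_ms)]
    refine List.filter_congr (fun t _ => ?_)
    have : (times.contains t) = (PySem.Set.contains (PySem.Set.ofList raw) t) := by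
      simp only [List.contains_eq_mem, PySem.Set.contains, eq_iff_iff, decide_eq_decide]
      rw [htimes, PySem.List.mem_sorted, PySem.Set.mem_ofList]
    rw [this]
  cases klines with
  | nil => simp [mergeMissing, chkLoopA, PySem.List.enumerate]
  | cons k rest =>
    simp only [List.isEmpty_cons, if_neg Bool.false_ne_true]
    rw [missingA_eq, chkLoopA_eq_all, hmergeB]
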